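-- pv_equiv track=rewrite | github.com/nabilahmed06/Advanced-Algorithsm-and-Data-Structures- | q7/enumerate.py | enumerate_tree_for_n_value
-- ===== SOURCE A (Python) =====
-- def enumerate_tree_for_n_value(a):
--     """
--     This functions takes a list/list of list
--     and does pre order traversal and generates the bit string
--     :param a: List/List of List
--     :return: A list containing the valid substring
--     """
--     b = []
--     for i in range(len(a)):
--         for j in range(len(a[i])):
--             if a[i][j] == "1":
--                 b.append(a[i][:j] + "01" + a[i][j:])
--
--     c = []
--     max_1 = int(b[0], 2)
--     c.append(b[0])
--     for i in range(1, len(b)):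
--         if int(b[i], 2) > max_1:
--             c.append(b[i])
--             max_1 = int(b[i], 2)
--
--     return c
-- ===== SOURCE B (Python) =====
-- def enumerate_tree_for_n_value(a):
--     """Stateless record characterization: a candidate is kept exactly when its
--     binary value strictly exceeds the value of EVERY earlier candidate, so no
--     running maximum is maintained at all; candidates/values are comprehensions."""
--     cands = [s[:j] + "01" + s[j:] for s in a for j, ch in enumerate(s) if ch == "1"]
--     vals = [int(s, 2) for s in cands]
--     return [c for i, c in enumerate(cands) if all(v < vals[i] for v in vals[:i])]
-- ===== Notes on version B (the rewrite author's own statement) =====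
-- stated objective: alternative
-- what changed: B replaces A's stateful running-maximum scan over a pre-built candidate list (with b[0] seeding the max) by a stateless record characterization: candidates and their values come from comprehensions, and a candidate is kept iff its value strictly exceeds every earlier candidate's value (a quadratic all() test, no accumulator, no special-cased first element).
-- outside the precondition, e.g. on enumerate_tree_for_n_value([' 1']): A returns [' 011'], B returns [' 011']; on enumerate_tree_for_n_value(['a1']): A raises ValueError, B raises ValueError; on enumerate_tree_for_n_value([]): A raises IndexError, B returns []
-- crash fix: On inputs where no string contains a '1' (so there are no candidates) A raises IndexError on b[0]; B returns []. — e.g. on enumerate_tree_for_n_value(["00"]): A raises IndexError, B returns []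
import Mathlib
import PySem

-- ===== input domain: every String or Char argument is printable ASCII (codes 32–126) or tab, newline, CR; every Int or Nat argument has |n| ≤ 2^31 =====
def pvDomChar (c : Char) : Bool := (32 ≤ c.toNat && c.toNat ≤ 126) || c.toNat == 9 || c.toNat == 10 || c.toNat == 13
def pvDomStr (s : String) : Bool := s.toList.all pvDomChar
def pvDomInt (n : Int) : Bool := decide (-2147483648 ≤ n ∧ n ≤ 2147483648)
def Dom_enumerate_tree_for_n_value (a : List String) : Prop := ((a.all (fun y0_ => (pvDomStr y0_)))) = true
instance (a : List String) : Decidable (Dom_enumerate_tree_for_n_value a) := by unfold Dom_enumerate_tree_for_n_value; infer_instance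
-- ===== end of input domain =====

-- B replaces A's running-max scan of a pre-built candidate list by a stateless record test
-- (keep a candidate iff its value exceeds every earlier candidate's value); where A raises
-- IndexError (no '1' anywhere, hence no candidate) B returns [] (see Raises_).


-- ===== PORT A =====
-- s[:j] + "01" + s[j:], on code points (exact for any characters)
def pvCand (t : List Char) (j : Int) : String :=
  String.ofList (PySem.List.slice t none (some j) ++ ['0', '1'] ++ PySem.List.slice t (some j) none)

-- int(s, 2): exact on Pre_'s domain (nonempty strings over {'0','1'} only)
def pvInt2 (s : String) : Int :=
  s.toList.foldl (fun acc c => 2 * acc + (if c = '1' then 1 else 0)) 0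

def enumerate_tree_for_n_value (a : List String) : List String :=
  let b := (PySem.List.pyRange 0 (a.length : Int)).foldl (fun b i =>
    let ai := PySem.List.pyGetD a i ""
    (PySem.List.pyRange 0 (ai.toList.length : Int)).foldl (fun b j =>
      if PySem.List.pyGet? ai.toList j = some '1' then b ++ [pvCand ai.toList j] else b) b) []
  let first := PySem.List.pyGetD b 0 ""   -- b[0]: IndexError when b = [] is excluded by Pre_
  ((PySem.List.pyRange 1 (b.length : Int)).foldl (fun (st : Int × List String) i =>
    let bi := PySem.List.pyGetD b i ""
    if pvInt2 bi > st.1 then (pvInt2 bi, st.2 ++ [bi]) else st) (pvInt2 first, [first])).2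

-- ===== PORT B =====
def enumerate_tree_for_n_value_alt (a : List String) : List String :=
  let cands := a.flatMap (fun s =>
    ((PySem.List.enumerate s.toList).filter (fun jc => jc.2 == '1')).map (fun jc => pvCand s.toList jc.1))
  let vals := cands.map pvInt2
  ((PySem.List.enumerate cands).filter (fun ic =>
      (PySem.List.slice vals none (some ic.1)).all (fun v => v < PySem.List.pyGetD vals ic.1 0))).map
    (fun ic => ic.2)

-- ===== PRECONDITION & SPEC =====
-- Pre_ keeps the inputs where Python A returns normally and int(·, 2) sees plain binary digits:
-- some string contains a '1' (else b[0] raises IndexError) and every string containing a '1' is made of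
-- '0'/'1' only (else int(·, 2) raises ValueError — except for rare int()-tolerated decorations such as
-- whitespace/sign/underscore around the digits, which A still parses; those are excluded too, for a
-- simple closed form — see claim.json "cites").
def Pre_enumerate_tree_for_n_value (a : List String) : Prop :=
  (a.any (fun s => s.toList.contains '1') &&
   a.all (fun s => !(s.toList.contains '1') || s.toList.all (fun c => c == '0' || c == '1'))) = true
instance (a : List String) : Decidable (Pre_enumerate_tree_for_n_value a) := by
  unfold Pre_enumerate_tree_for_n_value; infer_instance

def pvWitness_enumerate_tree_for_n_value : List String := ["10", "11"]

-- On inputs where no string contains a '1' there are no candidates: A raises IndexError on b[0]; B returns [].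
def Raises_enumerate_tree_for_n_value (a : List String) : Prop := ∀ s ∈ a, '1' ∉ s.toList
instance (a : List String) : Decidable (Raises_enumerate_tree_for_n_value a) := by
  unfold Raises_enumerate_tree_for_n_value; infer_instance
def pvRaiseWitness_enumerate_tree_for_n_value : List String := ["00"]
def pvRaiseWitnessOut_enumerate_tree_for_n_value : List String := []

def Spec_enumerate_tree_for_n_value (a : List String) (out : List String) : Prop :=
  out = enumerate_tree_for_n_value_alt a
instance (a : List String) (out : List String) : Decidable (Spec_enumerate_tree_for_n_value a out) := by
  unfold Spec_enumerate_tree_for_n_value; infer_instance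

-- ===== CLAIM (what is proved, stated in full; the proofs are below) =====
def Claim_equal_enumerate_tree_for_n_value : Prop := ∀ (a : List String), Dom_enumerate_tree_for_n_value a → Pre_enumerate_tree_for_n_value a → Spec_enumerate_tree_for_n_value a (enumerate_tree_for_n_value a)

def Claim_raises_enumerate_tree_for_n_value : Prop := (∀ (a : List String), Dom_enumerate_tree_for_n_value a → Raises_enumerate_tree_for_n_value a → ¬ Pre_enumerate_tree_for_n_value a) ∧ (Dom_enumerate_tree_for_n_value (pvRaiseWitness_enumerate_tree_for_n_value) ∧ Raises_enumerate_tree_for_n_value (pvRaiseWitness_enumerate_tree_for_n_value) ∧ enumerate_tree_for_n_value_alt (pvRaiseWitness_enumerate_tree_for_n_value) = pvRaiseWitnessOut_enumerate_tree_for_n_value)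

-- ===== LEMMAS AND PROOFS =====

-- the candidate stream both programs traverse, in order
def pvCandsOf (s : String) : List String :=
  ((PySem.List.enumerate s.toList).filter (fun jc => jc.2 == '1')).map (fun jc => pvCand s.toList jc.1)
def pvCands (a : List String) : List String := a.flatMap pvCandsOf

-- A's phase-2 step
def pvStep (st : Int × List String) (x : String) : Int × List String :=
  if pvInt2 x > st.1 then (pvInt2 x, st.2 ++ [x]) else st

-- the "records relative to previous values p" list B's filter computes
def pvRecF (p : List Int) : List String → List String
  | [] => []
  | y :: l => if p.all (fun v => v < pvInt2 y) then y :: pvRecF (p ++ [pvInt2 y]) l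
              else pvRecF (p ++ [pvInt2 y]) l

lemma pv_enum_get (t : List Char) : ∀ (s : Nat) (jc : Int × Char), jc ∈ PySem.List.enumerate t (s : Int) →
    ∃ k : Nat, jc.1 = ((s + k : Nat) : Int) ∧ t[k]? = some jc.2 := by
  induction t with
  | nil => intro s jc h; simp [PySem.List.enumerate] at h
  | cons x xs ih =>
    intro s jc h
    rw [PySem.List.enumerate_cons] at h
    rcases List.mem_cons.mp h with h | h
    · exact ⟨0, by simp [h]⟩
    · have hcast : ((s : Int) + 1) = ((s + 1 : Nat) : Int) := by push_cast; ring
      rw [hcast] at h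
      obtain ⟨k, hk1, hk2⟩ := ih (s + 1) jc h
      refine ⟨k + 1, by push_cast at hk1 ⊢; omega, ?_⟩
      simpa using hk2

lemma pv_mem_enum (t : List Char) (c : Char) (hc : c ∈ t) :
    ∀ s : Int, ∃ j, (j, c) ∈ PySem.List.enumerate t s := by
  induction t with
  | nil => simp at hc
  | cons x xs ih =>
    intro s
    rcases List.mem_cons.mp hc with h | h
    · exact ⟨s, by rw [PySem.List.enumerate_cons, h]; exact List.mem_cons_self⟩
    · obtain ⟨j, hj⟩ := ih h (s + 1)
      exact ⟨j, by rw [PySem.List.enumerate_cons]; exact List.mem_cons_of_mem _ hj⟩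

-- A's inner generation loop over one string
lemma pv_phaseA_inner (t : List Char) (init : List String) :
    (PySem.List.pyRange 0 (t.length : Int)).foldl (fun b j =>
      if PySem.List.pyGet? t j = some '1' then b ++ [pvCand t j] else b) init
    = init ++ ((PySem.List.enumerate t).filter (fun jc => jc.2 == '1')).map (fun jc => pvCand t jc.1) := by
  have hmap := PySem.List.map_fst_enumerate t 0
  rw [show ((0 : Int) + (t.length : Int)) = (t.length : Int) by ring] at hmap
  rw [← hmap, List.foldl_map]
  rw [PySem.List.foldl_congr_mem _ _
      (fun b (jc : Int × Char) => if jc.2 == '1' then b ++ [pvCand t jc.1] else b) init ?_]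
  · exact PySem.List.foldl_append_if _ _ _ _
  · intro acc jc hjc
    obtain ⟨k, hk1, hk2⟩ := pv_enum_get t 0 jc (by simpa using hjc)
    simp only [Nat.zero_add] at hk1
    rw [hk1, PySem.List.pyGet?_natCast, hk2]
    simp [hk1]

-- A's phase 1 produces exactly the candidate stream
lemma pv_phaseA1 (a : List String) :
    (PySem.List.pyRange 0 (a.length : Int)).foldl (fun b i =>
      let ai := PySem.List.pyGetD a i ""
      (PySem.List.pyRange 0 (ai.toList.length : Int)).foldl (fun b j =>
        if PySem.List.pyGet? ai.toList j = some '1' then b ++ [pvCand ai.toList j] else b) b) []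
    = pvCands a := by
  have h : (PySem.List.pyRange 0 (a.length : Int)).foldl (fun b i =>
      let ai := PySem.List.pyGetD a i ""
      (PySem.List.pyRange 0 (ai.toList.length : Int)).foldl (fun b j =>
        if PySem.List.pyGet? ai.toList j = some '1' then b ++ [pvCand ai.toList j] else b) b) []
      = a.foldl (fun b ai =>
        (PySem.List.pyRange 0 (ai.toList.length : Int)).foldl (fun b j =>
          if PySem.List.pyGet? ai.toList j = some '1' then b ++ [pvCand ai.toList j] else b) b) [] :=
    PySem.List.foldl_pyRange_zero_pyGetD' a ""
      (fun b ai => (PySem.List.pyRange 0 (ai.toList.length : Int)).foldl (fun b j =>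
        if PySem.List.pyGet? ai.toList j = some '1' then b ++ [pvCand ai.toList j] else b) b) []
  rw [h]
  have h2 : (fun (b : List String) (ai : String) =>
      (PySem.List.pyRange 0 (ai.toList.length : Int)).foldl (fun b j =>
        if PySem.List.pyGet? ai.toList j = some '1' then b ++ [pvCand ai.toList j] else b) b)
      = fun b ai => b ++ pvCandsOf ai :=
    funext fun b => funext fun ai => pv_phaseA_inner ai.toList b
  rw [h2, PySem.List.foldl_append_eq_flatMap]
  rfl

-- B's filter expression over the candidate list is pvRecF, generalized over the seen prefix p
lemma pv_filter_recF : ∀ (l : List String) (p : List Int),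
    ((PySem.List.enumerate l (p.length : Int)).filter (fun ic =>
        (PySem.List.slice (p ++ l.map pvInt2) none (some ic.1)).all
          (fun v => v < PySem.List.pyGetD (p ++ l.map pvInt2) ic.1 0))).map (fun ic => ic.2)
    = pvRecF p l := by
  intro l
  induction l with
  | nil => intro p; simp [pvRecF, PySem.List.enumerate]
  | cons y l ih =>
    intro p
    rw [PySem.List.enumerate_cons]
    have hslice : PySem.List.slice (p ++ (y :: l).map pvInt2) none (some ((p.length : Nat) : Int))
        = p := by
      rw [PySem.List.slice_to_natCast]; simp
    have hget : PySem.List.pyGetD (p ++ (y :: l).map pvInt2) ((p.length : Nat) : Int) 0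
        = pvInt2 y := by
      rw [PySem.List.pyGetD_natCast]; simp
    have hV : p ++ (y :: l).map pvInt2 = (p ++ [pvInt2 y]) ++ l.map pvInt2 := by simp
    have hlen : ((p.length : Int) + 1) = (((p ++ [pvInt2 y]).length : Nat) : Int) := by
      simp
    rw [List.filter_cons]
    simp only [hslice, hget]
    rw [hlen, hV]
    by_cases hall : p.all (fun v => decide (v < pvInt2 y)) = true
    · simp only [hall, if_pos]
      rw [List.map_cons, ih (p ++ [pvInt2 y])]
      simp only [pvRecF]
      rw [if_pos (by simpa using hall)]
    · rw [if_neg (by simpa using hall)]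
      rw [ih (p ++ [pvInt2 y])]
      simp only [pvRecF]
      rw [if_neg (by simpa using hall)]

-- A's phase-2 fold, seeded by a maximum m of the already-seen values p, appends exactly pvRecF p l
lemma pv_fold_recF : ∀ (l : List String) (p : List Int) (m : Int) (c : List String),
    m ∈ p → (∀ v ∈ p, v ≤ m) →
    (l.foldl pvStep (m, c)).2 = c ++ pvRecF p l := by
  intro l
  induction l with
  | nil => intro p m c _ _; simp [pvRecF]
  | cons y l ih =>
    intro p m c hm hub
    simp only [List.foldl_cons, pvRecF]
    by_cases h : pvInt2 y > m
    · have hall : p.all (fun v => v < pvInt2 y) = true := by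
        simp only [List.all_eq_true, decide_eq_true_eq]
        exact fun v hv => lt_of_le_of_lt (hub v hv) h
      rw [if_pos hall]
      have hstep : pvStep (m, c) y = (pvInt2 y, c ++ [y]) := by simp [pvStep, h]
      rw [hstep, ih (p ++ [pvInt2 y]) (pvInt2 y) (c ++ [y]) (by simp) ?_]
      · simp
      · intro v hv
        rcases List.mem_append.mp hv with hv | hv
        · exact le_of_lt (lt_of_le_of_lt (hub v hv) h)
        · simp at hv; omega
    · have hall : ¬ (p.all (fun v => v < pvInt2 y) = true) := by
        simp only [List.all_eq_true, decide_eq_true_eq]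
        push Not
        exact ⟨m, hm, by omega⟩
      rw [if_neg hall]
      have hstep : pvStep (m, c) y = (m, c) := by simp [pvStep, h]
      rw [hstep, ih (p ++ [pvInt2 y]) m c (List.mem_append_left _ hm) ?_]
      intro v hv
      rcases List.mem_append.mp hv with hv | hv
      · exact hub v hv
      · simp at hv; omega

lemma pv_cands_ne_nil (a : List String) (h : ∃ s ∈ a, '1' ∈ s.toList) : pvCands a ≠ [] := by
  obtain ⟨s, hs, h1⟩ := h
  intro hnil
  rw [pvCands, List.flatMap_eq_nil_iff] at hnil
  have hsnil := hnil s hs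
  unfold pvCandsOf at hsnil
  rw [List.map_eq_nil_iff, List.filter_eq_nil_iff] at hsnil
  obtain ⟨j, hj⟩ := pv_mem_enum s.toList '1' h1 0
  exact hsnil (j, '1') hj (by simp)

-- ===== VERDICT (by name: the statement is the Claim_ definition above) =====
theorem enumerate_tree_for_n_value_spec : Claim_equal_enumerate_tree_for_n_value := by
  intro a _ hPre
  unfold Spec_enumerate_tree_for_n_value
  unfold Pre_enumerate_tree_for_n_value at hPre
  simp only [Bool.and_eq_true, List.any_eq_true, List.contains_iff_mem] at hPre
  obtain ⟨hex, -⟩ := hPre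
  obtain ⟨x, rest, hxr⟩ := List.exists_cons_of_ne_nil (pv_cands_ne_nil a hex)
  -- B's side
  have hB : enumerate_tree_for_n_value_alt a = pvRecF [] (pvCands a) := by
    unfold enumerate_tree_for_n_value_alt
    have := pv_filter_recF (pvCands a) []
    simpa [pvCands, pvCandsOf] using this
  rw [hB, hxr]
  -- A's side
  unfold enumerate_tree_for_n_value
  rw [pv_phaseA1, hxr]
  simp only [PySem.List.pyGetD_zero_cons]
  have hfold : (PySem.List.pyRange 1 ((x :: rest).length : Int)).foldl
      (fun (st : Int × List String) i =>
        if pvInt2 (PySem.List.pyGetD (x :: rest) i "") > st.1 then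
          (pvInt2 (PySem.List.pyGetD (x :: rest) i ""), st.2 ++ [PySem.List.pyGetD (x :: rest) i ""])
        else st) (pvInt2 x, [x])
      = rest.foldl pvStep (pvInt2 x, [x]) :=
    PySem.List.foldl_pyRange_pyGetD' (x :: rest) "" pvStep (pvInt2 x, [x]) (by norm_num)
  rw [hfold]
  rw [pv_fold_recF rest [pvInt2 x] (pvInt2 x) [x] (by simp) (by simp)]
  simp [pvRecF]

@[simp]
theorem enumerate_tree_for_n_value_raises : Claim_raises_enumerate_tree_for_n_value := by
  unfold Claim_raises_enumerate_tree_for_n_value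
  refine ⟨?_, by decide⟩
  intro a _ hR hP
  unfold Pre_enumerate_tree_for_n_value at hP
  simp only [Bool.and_eq_true, List.any_eq_true, List.contains_iff_mem] at hP
  obtain ⟨⟨s, hs, h1⟩, -⟩ := hP
  exact hR s hs h1
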